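-- pv_equiv track=rewrite | github.com/sanathkumarbs/coding-challenges | recursion/hard/splitodd10.py | splitodd10
-- ===== SOURCE A (Python) =====
-- def splitodd10(nums, index=0, group1sum=0, group2sum=0):
--     if index >= len(nums):
--         if group1sum % 10 == 0 and group2sum % 2 == 1:
--             return True
--         elif group2sum % 10 == 0 and group1sum % 2 == 1:
--             return True
--         else:
--             return False
--
--     if splitodd10(nums, index+1, group1sum + nums[index], group2sum):
--         return True
--     else:
--         return splitodd10(nums, index+1, group1sum, group2sum + nums[index])
-- ===== SOURCE B (Python) =====
-- def splitodd10(nums, index=0, group1sum=0, group2sum=0):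
--     # Forward DP over reachable (group1sum % 10, group2sum % 10) residue pairs for the
--     # elements A's recursion visits (indices index, index+1, ..., len(nums)-1,
--     # each read with Python indexing, so a negative start reads the tail first).
--     states = {(group1sum % 10, group2sum % 10)}
--     for i in range(index, len(nums)):
--         x = nums[i]
--         states = ({((a + x) % 10, b) for (a, b) in states}
--                   | {(a, (b + x) % 10) for (a, b) in states})
--     return any((a == 0 and b % 2 == 1) or (b == 0 and a % 2 == 1)
--                for (a, b) in states)
-- ===== Notes on version B (the rewrite author's own statement) =====
-- stated objective: alternative
-- what changed: Replaced the try-both-groups backtracking recursion with a single forward subset-sum DP over the set of reachable (group1sum mod 10, group2sum mod 10) residue pairs (at most 100 states), checking the success condition per residue pair at the end.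
import Mathlib
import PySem

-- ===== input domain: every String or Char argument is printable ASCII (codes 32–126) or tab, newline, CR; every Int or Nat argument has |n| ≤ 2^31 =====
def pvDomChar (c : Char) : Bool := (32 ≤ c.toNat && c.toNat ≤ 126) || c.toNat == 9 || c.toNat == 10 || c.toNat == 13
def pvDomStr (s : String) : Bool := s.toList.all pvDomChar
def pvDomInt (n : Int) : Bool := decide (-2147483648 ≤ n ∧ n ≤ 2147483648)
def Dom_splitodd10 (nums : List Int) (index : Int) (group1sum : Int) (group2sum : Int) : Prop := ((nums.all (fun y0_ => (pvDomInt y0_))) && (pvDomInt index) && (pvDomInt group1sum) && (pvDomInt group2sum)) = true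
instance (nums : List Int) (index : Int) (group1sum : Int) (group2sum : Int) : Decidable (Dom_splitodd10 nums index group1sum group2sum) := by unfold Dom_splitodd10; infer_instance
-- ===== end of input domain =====

-- B replaces A's try-both-groups backtracking recursion by a forward DP over the
-- set of reachable (group1sum mod 10, group2sum mod 10) residue pairs (objective: alternative).

-- ===== PORT A =====
-- the base case of A: index >= len(nums)
def splitodd10Base (group1sum group2sum : Int) : Bool :=
  if PySem.Int.mod group1sum 10 == 0 && PySem.Int.mod group2sum 2 == 1 then true
  else if PySem.Int.mod group2sum 10 == 0 && PySem.Int.mod group1sum 2 == 1 then true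
  else false

-- A's recursion, with fuel = number of remaining recursive steps (len(nums) - index);
-- at fuel 0 we have index >= len(nums), i.e. the base case
def splitodd10Go (nums : List Int) : Nat → Int → Int → Int → Bool
  | 0, group1sum, group2sum, _index => splitodd10Base group1sum group2sum
  | fuel + 1, group1sum, group2sum, index =>
    if (nums.length : Int) ≤ index then splitodd10Base group1sum group2sum
    else
      -- nums[index]: Python raises IndexError when index < -len(nums); Pre_ excludes that
      let x := (PySem.List.pyGet? nums index).getD 0
      if splitodd10Go nums fuel (group1sum + x) group2sum (index + 1) then true
      else splitodd10Go nums fuel group1sum (group2sum + x) (index + 1)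

def splitodd10 (nums : List Int) (index : Int) (group1sum : Int) (group2sum : Int) : Bool :=
  splitodd10Go nums ((nums.length : Int) - index).toNat group1sum group2sum index

-- ===== PORT B =====
-- the success test applied to a residue pair (a, b) = (g1 % 10, g2 % 10)
def pvCheck (p : Int × Int) : Bool :=
  (p.1 == 0 && PySem.Int.mod p.2 2 == 1) || (p.2 == 0 && PySem.Int.mod p.1 2 == 1)

-- one DP step: states = {((a+x)%10, b) for ...} | {(a, (b+x)%10) for ...}
def pvStep (s : PySem.Set (Int × Int)) (x : Int) : PySem.Set (Int × Int) :=
  PySem.Set.union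
    (PySem.Set.ofList (s.map (fun p => (PySem.Int.mod (p.1 + x) 10, p.2))))
    (PySem.Set.ofList (s.map (fun p => (p.1, PySem.Int.mod (p.2 + x) 10))))

def splitodd10_alt (nums : List Int) (index : Int) (group1sum : Int) (group2sum : Int) : Bool :=
  ((PySem.List.pyRange index (nums.length : Int) 1).foldl
      (fun s i => pvStep s (PySem.List.pyGetD nums i 0))
      (PySem.Set.ofList [(PySem.Int.mod group1sum 10, PySem.Int.mod group2sum 10)])).any pvCheck

-- ===== PRECONDITION & SPEC =====
-- Pre_ excludes exactly the inputs on which the Python A raises IndexError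
-- (index < -len(nums)); B's Python raises IndexError there too.
def Pre_splitodd10 (nums : List Int) (index : Int) (group1sum : Int) (group2sum : Int) : Prop :=
  -(nums.length : Int) ≤ index
instance (nums : List Int) (index : Int) (group1sum : Int) (group2sum : Int) : Decidable (Pre_splitodd10 nums index group1sum group2sum) := by unfold Pre_splitodd10; infer_instance

def pvWitness_splitodd10 : List Int × Int × Int × Int := ([7, 3, 10], 0, 0, 0)

def Spec_splitodd10 (nums : List Int) (index : Int) (group1sum : Int) (group2sum : Int) (out : Bool) : Prop := out = splitodd10_alt nums index group1sum group2sum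
instance (nums : List Int) (index : Int) (group1sum : Int) (group2sum : Int) (out : Bool) : Decidable (Spec_splitodd10 nums index group1sum group2sum out) := by unfold Spec_splitodd10; infer_instance

-- ===== CLAIM (what is proved, stated in full; the proofs are below) =====
def Claim_equal_splitodd10 : Prop := ∀ (nums : List Int) (index : Int) (group1sum : Int) (group2sum : Int), Dom_splitodd10 nums index group1sum group2sum → Pre_splitodd10 nums index group1sum group2sum → Spec_splitodd10 nums index group1sum group2sum (splitodd10 nums index group1sum group2sum)

-- ===== LEMMAS AND PROOFS =====

-- the recursion of A, re-expressed on residue pairs over an explicit element list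
def goR : List Int → Int → Int → Bool
  | [], a, b => pvCheck (a, b)
  | x :: xs, a, b => goR xs (PySem.Int.mod (a + x) 10) b || goR xs a (PySem.Int.mod (b + x) 10)

lemma mod_mod_ten_two (g : Int) :
    PySem.Int.mod (PySem.Int.mod g 10) 2 = PySem.Int.mod g 2 := by
  simp only [PySem.Int.mod_eq_emod_of_pos (show (0:Int) < 10 by norm_num),
    PySem.Int.mod_eq_emod_of_pos (show (0:Int) < 2 by norm_num)]
  omega

lemma mod_add_mod_ten (g x : Int) :
    PySem.Int.mod (PySem.Int.mod g 10 + x) 10 = PySem.Int.mod (g + x) 10 := by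
  simp only [PySem.Int.mod_eq_emod_of_pos (show (0:Int) < 10 by norm_num)]
  omega

-- DP step characterised by membership
lemma any_pvStep (s : PySem.Set (Int × Int)) (x : Int) (f : Int × Int → Bool) :
    (pvStep s x).any f
      = s.any (fun p => f (PySem.Int.mod (p.1 + x) 10, p.2)
                        || f (p.1, PySem.Int.mod (p.2 + x) 10)) := by
  apply Bool.eq_iff_iff.mpr
  simp only [List.any_eq_true, pvStep, PySem.Set.mem_union, PySem.Set.mem_ofList,
    List.mem_map, Bool.or_eq_true]
  constructor
  · rintro ⟨q, (⟨p, hp, rfl⟩ | ⟨p, hp, rfl⟩), hq⟩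
    · exact ⟨p, hp, Or.inl hq⟩
    · exact ⟨p, hp, Or.inr hq⟩
  · rintro ⟨p, hp, (h | h)⟩
    · exact ⟨_, Or.inl ⟨p, hp, rfl⟩, h⟩
    · exact ⟨_, Or.inr ⟨p, hp, rfl⟩, h⟩

-- the whole DP fold equals "some start pair succeeds under goR"
lemma foldl_pvStep_any (L : List Int) (s : PySem.Set (Int × Int)) :
    (L.foldl pvStep s).any pvCheck = s.any (fun p => goR L p.1 p.2) := by
  induction L generalizing s with
  | nil => simp [goR]
  | cons x xs ih =>
      simp only [List.foldl_cons, ih, any_pvStep]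
      rfl

lemma if_if_eq_or (b c : Bool) : (if b = true then true else if c = true then true else false) = (b || c) := by
  cases b <;> cases c <;> rfl

lemma if_eq_or (b c : Bool) : (if b = true then true else c) = (b || c) := by
  cases b <;> rfl

-- the base check equals pvCheck on residues
lemma base_eq_pvCheck (g1 g2 : Int) :
    splitodd10Base g1 g2 = pvCheck (PySem.Int.mod g1 10, PySem.Int.mod g2 10) := by
  simp only [splitodd10Base, pvCheck, mod_mod_ten_two]
  exact if_if_eq_or _ _

-- A's recursion equals goR over the visited elements, on residues
lemma splitodd10Go_eq_goR (nums : List Int) :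
    ∀ (n : Nat) (index g1 g2 : Int),
      ((nums.length : Int) - index).toNat = n →
      -(nums.length : Int) ≤ index →
      splitodd10Go nums n g1 g2 index
        = goR ((PySem.List.pyRange index (nums.length : Int) 1).map
                 (fun i => PySem.List.pyGetD nums i 0))
              (PySem.Int.mod g1 10) (PySem.Int.mod g2 10) := by
  intro n
  induction n with
  | zero =>
      intro index g1 g2 hn hlo
      have hr : PySem.List.pyRange index (nums.length : Int) 1 = [] := by
        apply List.eq_nil_of_length_eq_zero
        rw [PySem.List.length_pyRange_one]; omega
      rw [hr]
      simp only [splitodd10Go, List.map_nil, goR]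
      exact base_eq_pvCheck g1 g2
  | succ n ih =>
      intro index g1 g2 hn hlo
      have hlt : index < (nums.length : Int) := by omega
      have hx : (PySem.List.pyGet? nums index).getD 0 = PySem.List.pyGetD nums index 0 := rfl
      have hr : PySem.List.pyRange index (nums.length : Int) 1
          = index :: PySem.List.pyRange (index + 1) (nums.length : Int) 1 :=
        PySem.List.pyRange_one_cons hlt
      rw [hr, List.map_cons]
      set x := (PySem.List.pyGet? nums index).getD 0 with hxdef
      have ih1 := ih (index + 1) (g1 + x) g2 (by omega) (by omega)
      have ih2 := ih (index + 1) g1 (g2 + x) (by omega) (by omega)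
      show (if (nums.length : Int) ≤ index then splitodd10Base g1 g2
            else if splitodd10Go nums n (g1 + x) g2 (index + 1) then true
                 else splitodd10Go nums n g1 (g2 + x) (index + 1)) = _
      rw [if_neg (by omega : ¬ (nums.length : Int) ≤ index), ih1, ih2]
      simp only [goR, hx, mod_add_mod_ten]
      exact if_eq_or _ _

-- ===== VERDICT (by name: the statement is the Claim_ definition above) =====
theorem splitodd10_spec : Claim_equal_splitodd10 := by
  intro nums index g1 g2 _hdom hpre
  unfold Spec_splitodd10 splitodd10_alt
  unfold splitodd10
  rw [splitodd10Go_eq_goR nums (((nums.length : Int) - index).toNat) index g1 g2 rfl hpre,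
      ← List.foldl_map, foldl_pvStep_any]
  simp [PySem.Set.ofList, PySem.Set.add]
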